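-- pv_equiv track=rewrite | github.com/williamqian12/TermProject | frontend.py | convStrToList
-- ===== SOURCE A (Python) =====
-- def convStrToList(str):#Takes "FFFFFF" makes [["F","F"],["F","F"],["F","F"]]
--     temp=[]
--     final=[]
--     for char in str:
--         temp.append(char)
--         if(len(temp)==2):
--             final.append(temp)
--             temp=[]
--     return final
-- ===== SOURCE B (Python) =====
-- def convStrToList(str):
--     return [[str[i], str[i + 1]] for i in range(0, len(str) - 1, 2)]
-- ===== Notes on version B (the rewrite author's own statement) =====
-- stated objective: idiomatic
-- what changed: Replaces the character loop that maintains a temp buffer and flushes it into an accumulator with a single comprehension over a stride-2 index range, reading each pair directly by index.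
import Mathlib
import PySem

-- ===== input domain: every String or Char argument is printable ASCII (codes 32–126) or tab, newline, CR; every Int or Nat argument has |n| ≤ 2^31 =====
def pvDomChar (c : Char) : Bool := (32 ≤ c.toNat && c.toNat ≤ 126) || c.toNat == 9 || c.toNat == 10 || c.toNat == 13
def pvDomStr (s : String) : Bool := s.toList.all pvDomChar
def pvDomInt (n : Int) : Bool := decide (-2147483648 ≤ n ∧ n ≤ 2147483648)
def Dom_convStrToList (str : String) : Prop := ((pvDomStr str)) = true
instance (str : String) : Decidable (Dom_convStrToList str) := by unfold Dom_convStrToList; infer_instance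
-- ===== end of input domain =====

-- B replaces A's temp-buffer-and-flush loop with a comprehension over a stride-2 index range (idiomatic, same cost).
-- ===== PORT A =====
def convStrToList (str : String) : List (List String) :=
  (str.toList.foldl
    (fun (st : List String × List (List String)) c =>
      let temp := st.1 ++ [String.ofList [c]]
      if temp.length == 2 then ([], st.2 ++ [temp]) else (temp, st.2))
    ([], [])).2

-- ===== PORT B =====
def convStrToList_alt (str : String) : List (List String) :=
  let cs := str.toList
  (PySem.List.pyRange 0 ((cs.length : Int) - 1) 2).map
    (fun i => [String.ofList [PySem.List.pyGetD cs i ' '],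
               String.ofList [PySem.List.pyGetD cs (i + 1) ' ']])

-- ===== PRECONDITION & SPEC =====
def Spec_convStrToList (str : String) (out : List (List String)) : Prop := out = convStrToList_alt str
instance (str : String) (out : List (List String)) : Decidable (Spec_convStrToList str out) := by unfold Spec_convStrToList; infer_instance

-- ===== CLAIM (what is proved, stated in full; the proofs are below) =====
def Claim_equal_convStrToList : Prop := ∀ (str : String), Dom_convStrToList str → Spec_convStrToList str (convStrToList str)

-- ===== LEMMAS AND PROOFS =====

-- ===== VERDICT (by name: the statement is the Claim_ definition above) =====
-- proof-side helper: the pair list, two characters at a time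
def pairsB : List Char → List (List String)
  | c1 :: c2 :: rest => [String.ofList [c1], String.ofList [c2]] :: pairsB rest
  | _ => []

theorem pairsB_key : ∀ (cs : List Char) (final : List (List String)),
    (cs.foldl
      (fun (st : List String × List (List String)) c =>
        let temp := st.1 ++ [String.ofList [c]]
        if temp.length == 2 then ([], st.2 ++ [temp]) else (temp, st.2))
      ([], final)).2 = final ++ pairsB cs := by
  intro cs
  induction cs using pairsB.induct with
  | case1 c1 c2 rest ih =>
      intro final
      rw [List.foldl_cons, List.foldl_cons]
      show (rest.foldl _ ([], final ++ [[String.ofList [c1], String.ofList [c2]]])).2 = _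
      rw [ih]
      simp [pairsB]
  | case2 cs h =>
      intro final
      rcases cs with _ | ⟨c, _ | ⟨c2, rest⟩⟩
      · simp [pairsB]
      · simp [List.foldl, pairsB]
      · exact absurd rfl (h c c2 rest)

theorem pairsB_eq_map : ∀ (cs : List Char),
    pairsB cs = (List.range (cs.length / 2)).map
      (fun k => [String.ofList [cs.getD (2 * k) ' '], String.ofList [cs.getD (2 * k + 1) ' ']]) := by
  intro cs
  induction cs using pairsB.induct with
  | case1 c1 c2 rest ih =>
      have hlen : (c1 :: c2 :: rest).length / 2 = rest.length / 2 + 1 := by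
        simp only [List.length_cons]; omega
      rw [pairsB, ih, hlen, List.range_succ_eq_map]
      simp [List.map_map, Function.comp, Nat.mul_succ]
  | case2 cs h =>
      rcases cs with _ | ⟨c, _ | ⟨c2, rest⟩⟩
      · simp [pairsB]
      · simp [pairsB]
      · exact absurd rfl (h c c2 rest)

theorem pyRange_stride2 (L : Nat) :
    PySem.List.pyRange 0 ((L : Int) - 1) 2 = (List.range (L / 2)).map (fun k : Nat => 2 * (k : Int)) := by
  unfold PySem.List.pyRange
  rw [if_neg (by norm_num : ¬ (2:Int) = 0), if_pos (by norm_num : (0:Int) < 2)]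
  by_cases hL : (0:Int) < (L : Int) - 1
  · rw [if_pos hL]
    have hc : (((L : Int) - 1 - 0 + 2 - 1) / 2).toNat = L / 2 := by omega
    rw [hc]
    exact List.map_congr_left (fun k _ => by ring)
  · rw [if_neg hL]
    have h0 : L / 2 = 0 := by omega
    rw [h0]; simp

theorem convStrToList_spec : Claim_equal_convStrToList := by
  intro str _
  unfold Spec_convStrToList convStrToList convStrToList_alt
  show _ = (let cs := str.toList; _)
  simp only []
  rw [pyRange_stride2 str.toList.length, List.map_map]
  have := pairsB_key str.toList []
  simp only [List.nil_append] at this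
  rw [this, pairsB_eq_map]
  apply List.map_congr_left
  intro k _
  have e1 : (2 * (k : Int)) = ((2 * k : Nat) : Int) := by push_cast; ring
  have e2 : (2 * (k : Int) + 1) = ((2 * k + 1 : Nat) : Int) := by push_cast; ring
  have e3 : ((2 * k : Nat) : Int) + 1 = ((2 * k + 1 : Nat) : Int) := by push_cast; ring
  simp only [Function.comp_apply, e1, e3, PySem.List.pyGetD_natCast]
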